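-- pv_equiv track=rewrite | github.com/etaci/Smart-Extractor | src/smart_extractor/storage/csv_storage.py | _merge_fieldnames
-- ===== SOURCE A (Python) =====
-- from typing import Any, Optional
--
-- def _merge_fieldnames(
--
--     existing_fieldnames: list[str],
--     rows: list[dict[str, Any]],
-- ) -> list[str]:
--     merged = list(existing_fieldnames)
--     for row in rows:
--         for field in row.keys():
--             if field not in merged:
--                 merged.append(field)
--     return merged
-- ===== SOURCE B (Python) =====
-- def _merge_fieldnames(
--     existing_fieldnames: list[str],
--     rows: list[dict[str, any]],
-- ) -> list[str]:
--     keys = [f for row in rows for f in row.keys()]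
--     first = {}
--     for i, f in reversed(list(enumerate(keys))):
--         first[f] = i
--     existing = set(existing_fieldnames)
--     new = [f for i, f in enumerate(keys) if f not in existing and first[f] == i]
--     return list(existing_fieldnames) + new
-- ===== Notes on version B (the rewrite author's own statement) =====
-- stated objective: alternative
-- what changed: Replaces the incremental membership-test-and-append loop with a two-stage first-occurrence-index algorithm: a reverse pass over the enumerated flattened keys builds a dict mapping each key to its first index, then a single filtering pass keeps a key exactly at its first occurrence (skipping names already in a set of the existing fieldnames), concatenated after the unchanged existing list.
import Mathlib
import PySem

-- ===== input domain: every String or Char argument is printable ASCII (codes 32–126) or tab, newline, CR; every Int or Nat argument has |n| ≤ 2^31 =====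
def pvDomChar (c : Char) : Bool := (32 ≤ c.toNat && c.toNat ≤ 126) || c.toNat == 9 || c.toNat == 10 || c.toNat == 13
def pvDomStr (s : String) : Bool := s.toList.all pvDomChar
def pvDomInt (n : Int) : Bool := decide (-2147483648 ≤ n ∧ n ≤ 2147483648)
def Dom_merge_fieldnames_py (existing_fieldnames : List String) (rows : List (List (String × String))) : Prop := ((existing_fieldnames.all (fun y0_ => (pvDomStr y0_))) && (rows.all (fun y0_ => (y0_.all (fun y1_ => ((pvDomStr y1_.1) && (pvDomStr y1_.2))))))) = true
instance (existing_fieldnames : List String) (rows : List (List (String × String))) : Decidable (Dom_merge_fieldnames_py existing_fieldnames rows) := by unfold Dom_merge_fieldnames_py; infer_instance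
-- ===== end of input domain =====

-- ===== PORT A =====
-- header: B replaces A's grow-and-scan append loop by a two-stage first-occurrence-index
-- algorithm (reverse pass building a first-index dict, then one filtering pass); return
-- values proved equal on the whole domain.
def merge_fieldnames_py (existing_fieldnames : List String) (rows : List (List (String × String))) : List String :=
  rows.foldl
    (fun merged row =>
      row.foldl (fun m kv => if m.contains kv.1 then m else m ++ [kv.1]) merged)
    existing_fieldnames

-- ===== PORT B =====
def merge_fieldnames_py_alt (existing_fieldnames : List String) (rows : List (List (String × String))) : List String :=
  let keys := rows.flatMap (fun row => row.map Prod.fst)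
  let first := ((PySem.List.enumerate keys 0).reverse).foldl
      (fun (d : PySem.Dict String Int) p => d.insert p.2 p.1) PySem.Dict.empty
  let existing : PySem.Set String := PySem.Set.ofList existing_fieldnames
  let newF := ((PySem.List.enumerate keys 0).filter
      (fun p => !(PySem.Set.contains existing p.2) && (first.get? p.2 == some p.1))).map Prod.snd
  existing_fieldnames ++ newF

-- ===== PRECONDITION & SPEC =====
def Spec_merge_fieldnames_py (existing_fieldnames : List String) (rows : List (List (String × String))) (out : List String) : Prop := out = merge_fieldnames_py_alt existing_fieldnames rows
instance (existing_fieldnames : List String) (rows : List (List (String × String))) (out : List String) : Decidable (Spec_merge_fieldnames_py existing_fieldnames rows out) := by unfold Spec_merge_fieldnames_py; infer_instance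

-- ===== CLAIM (what is proved, stated in full; the proofs are below) =====
def Claim_equal_merge_fieldnames_py : Prop := ∀ (existing_fieldnames : List String) (rows : List (List (String × String))), Dom_merge_fieldnames_py existing_fieldnames rows → Spec_merge_fieldnames_py existing_fieldnames rows (merge_fieldnames_py existing_fieldnames rows)

-- ===== LEMMAS AND PROOFS =====

-- A's inner loop over one row is a fold of PySem.Set.add over the row's keys.
theorem innerA (r : List (String × String)) (s : List String) :
    r.foldl (fun m kv => if m.contains kv.1 then m else m ++ [kv.1]) s
    = (r.map Prod.fst).foldl PySem.Set.add s := by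
  induction r generalizing s with
  | nil => rfl
  | cons kv r ih => rw [List.foldl_cons, List.map_cons, List.foldl_cons, ih]; rfl

-- A's nested fold is a single fold of Set.add over the flattened key list.
theorem foldA_flat (rows : List (List (String × String))) (s : List String) :
    rows.foldl
      (fun merged row =>
        row.foldl (fun m kv => if m.contains kv.1 then m else m ++ [kv.1]) merged) s
    = (rows.flatMap (fun row => row.map Prod.fst)).foldl PySem.Set.add s := by
  induction rows generalizing s with
  | nil => rfl
  | cons r rs ih =>
      rw [List.foldl_cons, List.flatMap_cons, List.foldl_append, ih, innerA]

-- Folding Set.add over ks from s equals s plus the fold, from [], over the keys not in s.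
theorem update_split (ks : List String) : ∀ (s d : List String),
    ks.foldl PySem.Set.add (s ++ d)
    = s ++ (ks.filter (fun f => !(s.contains f))).foldl PySem.Set.add d := by
  induction ks with
  | nil => intro s d; rfl
  | cons k ks ih =>
      intro s d
      rw [List.foldl_cons, List.filter_cons]
      by_cases hs : k ∈ s
      · have h1 : PySem.Set.add (s ++ d) k = s ++ d := by simp [PySem.Set.add, hs]
        rw [h1]
        simpa [hs] using ih s d
      · by_cases hd : k ∈ d
        · have h1 : PySem.Set.add (s ++ d) k = s ++ d := by simp [PySem.Set.add, hd]
          have h2 : PySem.Set.add d k = d := by simp [PySem.Set.add, hd]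
          rw [h1]
          simpa [hs, h2] using ih s d
        · have h1 : PySem.Set.add (s ++ d) k = s ++ (d ++ [k]) := by
            simp [PySem.Set.add, hs, hd]
          have h2 : PySem.Set.add d k = d ++ [k] := by simp [PySem.Set.add, hd]
          rw [h1]
          simpa [hs, h2] using ih s (d ++ [k])

-- membership in set(existing) is membership in the existing list
theorem contains_ofList (ex : List String) (f : String) :
    (PySem.Set.ofList ex).contains f = ex.contains f := by
  simp [PySem.Set.contains, List.contains_eq_mem, PySem.Set.mem_ofList]

-- proof-only helper: ordered dedup with an explicit seen list
def ddAux : List String → List String → List String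
  | [], _ => []
  | f :: fs, seen => if seen.contains f then ddAux fs seen else f :: ddAux fs (seen ++ [f])

theorem ddAux_congr (l : List String) : ∀ (s t : List String),
    (∀ x, x ∈ s ↔ x ∈ t) → ddAux l s = ddAux l t := by
  induction l with
  | nil => intro s t _; rfl
  | cons f fs ih =>
      intro s t h
      simp only [ddAux, List.contains_eq_mem]
      by_cases hf : f ∈ s
      · simp [hf, (h f).mp hf, ih s t h]
      · have hft : f ∉ t := fun ht => hf ((h f).mpr ht)
        simp only [hf, hft, decide_false, if_neg Bool.false_ne_true]
        refine congrArg (f :: ·) (ih _ _ ?_)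
        intro x; simp [h x]

theorem ddAux_spec (l : List String) : ∀ (seen : List String),
    seen ++ ddAux l seen = l.foldl PySem.Set.add seen := by
  induction l with
  | nil => intro seen; simp [ddAux]
  | cons f fs ih =>
      intro seen
      simp only [ddAux, List.foldl_cons]
      by_cases hf : f ∈ seen
      · have : PySem.Set.add seen f = seen := by simp [PySem.Set.add, hf]
        simp only [List.contains_eq_mem, hf, decide_true, if_true, this, ih]
      · have h2 : PySem.Set.add seen f = seen ++ [f] := by simp [PySem.Set.add, hf]
        simp only [List.contains_eq_mem, hf, decide_false, if_neg Bool.false_ne_true, h2, ← ih]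
        simp

-- the reverse-pass dict: lookup is the FIRST pair with matching second component
theorem get?_foldr_insert (ps : List (Int × String)) (x : String) :
    ((ps.foldr (fun p (d : PySem.Dict String Int) => d.insert p.2 p.1) PySem.Dict.empty).get? x)
    = (ps.find? (fun r => r.2 == x)).map Prod.fst := by
  induction ps with
  | nil => simp [PySem.Dict.get?_empty]
  | cons p ps ih =>
      simp only [List.foldr_cons, List.find?_cons]
      by_cases hx : p.2 = x
      · subst hx; simp [PySem.Dict.get?_insert_self]
      · have : (p.2 == x) = false := by simp [hx]
        rw [this, PySem.Dict.get?_insert_of_ne _ _ (fun h => hx h.symm), ih]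

-- core: filtering the enumerated keys at their first-occurrence index is ordered dedup
theorem core (q : String → Bool) :
    ∀ (suf pre : List (Int × String)), (pre ++ suf).Pairwise (fun a b => a.1 ≠ b.1) →
    ((suf.filter (fun p => q p.2 &&
        (((pre ++ suf).find? (fun r => r.2 == p.2)).map Prod.fst == some p.1))).map Prod.snd)
    = ddAux ((suf.map Prod.snd).filter q) ((pre.map Prod.snd).filter q) := by
  intro suf
  induction suf with
  | nil => intro pre _; simp [ddAux]
  | cons p suf ih =>
      intro pre hpw
      have hassoc : pre ++ p :: suf = (pre ++ [p]) ++ suf := by simp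
      have hpw' : ((pre ++ [p]) ++ suf).Pairwise (fun a b => a.1 ≠ b.1) := by
        rwa [← hassoc]
      have hL := ih (pre ++ [p]) hpw'
      by_cases hq : q p.2 = true
      · by_cases hmem : p.2 ∈ pre.map Prod.snd
        · -- first occurrence is in pre: condition false, seen-test true
          obtain ⟨r, hr, hr2⟩ : ∃ r ∈ pre, r.2 = p.2 := by
            obtain ⟨r, hr, hr2⟩ := List.mem_map.mp hmem
            exact ⟨r, hr, hr2⟩
          have hex : ∃ r' ∈ pre, (fun r => r.2 == p.2) r' = true := ⟨r, hr, by simp [hr2]⟩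
          obtain ⟨r', hr'⟩ := Option.isSome_iff_exists.mp (List.find?_isSome.mpr hex)
          have hr'pre : r' ∈ pre := List.mem_of_find?_eq_some hr'
          have hfind : ((pre ++ p :: suf).find? (fun r => r.2 == p.2)) = some r' := by
            rw [List.find?_append, hr']; rfl
          have hne : r'.1 ≠ p.1 :=
            (List.pairwise_append.mp hpw).2.2 r' hr'pre p List.mem_cons_self
          have hcond : ((((pre ++ p :: suf).find? (fun r => r.2 == p.2)).map Prod.fst
              == some p.1) : Bool) = false := by
            rw [hfind]; simpa using hne
          have hseencontains : ((pre.map Prod.snd).filter q).contains p.2 = true := by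
            simp only [List.contains_eq_mem, decide_eq_true_eq, List.mem_filter]
            exact ⟨hmem, hq⟩
          rw [List.filter_cons, hcond, List.map_cons, List.filter_cons, hq]
          simp only [Bool.and_false, Bool.false_eq_true, if_false, if_true, ddAux,
            hseencontains, if_true]
          rw [hassoc, hL]
          refine ddAux_congr _ _ _ ?_
          intro x
          by_cases hxp : x = p.2 <;>
            simp [List.filter_append, hq, hxp, List.mem_filter, hmem]
        · -- genuinely first occurrence: condition true, emit and extend seen
          have hnone : (pre.find? (fun r => r.2 == p.2)) = none := by
            apply List.find?_eq_none.mpr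
            intro r hr
            simp only [beq_iff_eq]
            intro h2
            exact hmem (List.mem_map.mpr ⟨r, hr, h2⟩)
          have hfind : ((pre ++ p :: suf).find? (fun r => r.2 == p.2)) = some p := by
            rw [List.find?_append, hnone]; simp
          have hcond : ((((pre ++ p :: suf).find? (fun r => r.2 == p.2)).map Prod.fst
              == some p.1) : Bool) = true := by
            rw [hfind]; simp
          have hnotseen : ((pre.map Prod.snd).filter q).contains p.2 = false := by
            simp only [List.contains_eq_mem, decide_eq_false_iff_not, List.mem_filter]
            exact fun h => hmem h.1
          rw [List.filter_cons, hcond, List.map_cons, List.filter_cons, hq]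
          simp only [Bool.and_true, if_true, List.map_cons, ddAux, hnotseen,
            Bool.false_eq_true, if_false]
          have hseen : ((pre ++ [p]).map Prod.snd).filter q
              = (pre.map Prod.snd).filter q ++ [p.2] := by
            simp [List.filter_append, hq]
          rw [hassoc, hL, hseen]
      · -- key filtered out by q on both sides
        have hqf : q p.2 = false := by simpa using hq
        have hpre : ((pre ++ [p]).map Prod.snd).filter q = (pre.map Prod.snd).filter q := by
          simp [List.filter_append, hqf]
        rw [List.filter_cons, hqf, List.map_cons, List.filter_cons, hqf]
        simp only [Bool.false_and, Bool.false_eq_true, if_false]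
        rw [hassoc, hL, hpre]

-- enumerate has pairwise distinct indices
theorem enum_ne (keys : List String) :
    (PySem.List.enumerate keys 0).Pairwise (fun a b => a.1 ≠ b.1) :=
  (PySem.List.pairwise_lt_enumerate keys 0).imp (fun h => ne_of_lt h)

-- ===== VERDICT (by name: the statement is the Claim_ definition above) =====
theorem merge_fieldnames_py_spec : Claim_equal_merge_fieldnames_py := by
  intro ex rows _
  show merge_fieldnames_py ex rows = merge_fieldnames_py_alt ex rows
  set keys := rows.flatMap (fun row => row.map Prod.fst) with hkeys
  -- A side: ex ++ ordered dedup of the keys not in ex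
  have hA : merge_fieldnames_py ex rows
      = ex ++ (keys.filter (fun f => !(ex.contains f))).foldl PySem.Set.add [] := by
    simp only [merge_fieldnames_py]
    rw [foldA_flat]
    have h := update_split keys ex []
    rw [List.append_nil] at h
    exact h
  -- B side
  have hfoldr : ((PySem.List.enumerate keys 0).reverse).foldl
      (fun (d : PySem.Dict String Int) p => d.insert p.2 p.1) PySem.Dict.empty
      = (PySem.List.enumerate keys 0).foldr
          (fun p (d : PySem.Dict String Int) => d.insert p.2 p.1) PySem.Dict.empty := by
    rw [List.foldl_reverse]
  have hpred : ∀ p : Int × String,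
      ((!(PySem.Set.contains (PySem.Set.ofList ex) p.2) &&
        ((((PySem.List.enumerate keys 0).reverse).foldl
          (fun (d : PySem.Dict String Int) p => d.insert p.2 p.1) PySem.Dict.empty).get? p.2
          == some p.1)) : Bool)
      = ((!(ex.contains p.2)) &&
          ((((PySem.List.enumerate keys 0)).find? (fun r => r.2 == p.2)).map Prod.fst
            == some p.1)) := by
    intro p
    rw [hfoldr, get?_foldr_insert, contains_ofList]
  have hB : merge_fieldnames_py_alt ex rows
      = ex ++ ddAux (keys.filter (fun f => !(ex.contains f))) [] := by
    simp only [merge_fieldnames_py_alt]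
    rw [← hkeys]
    refine congrArg (ex ++ ·) ?_
    rw [List.filter_congr (fun p _ => hpred p)]
    have hc := core (fun f => !(ex.contains f)) (PySem.List.enumerate keys 0) [] (by
      simpa using enum_ne keys)
    simp only [List.nil_append, List.map_nil, List.filter_nil] at hc
    rw [hc]
    have hsnd : (PySem.List.enumerate keys 0).map Prod.snd = keys := by
      simp [PySem.List.map_snd_enumerate]
    rw [hsnd]
  rw [hA, hB]
  refine congrArg (ex ++ ·) ?_
  have h0 := ddAux_spec (keys.filter (fun f => !(ex.contains f))) []
  rw [List.nil_append] at h0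
  exact h0.symm
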